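-- pv_equiv track=rewrite | github.com/Hadassah1999/ex1_CompBio | part1.py | initialize_glider_grid
-- ===== SOURCE A (Python) =====
-- def initialize_glider_grid(grid_size):
--     grid = [[0 for _ in range(grid_size)] for _ in range(grid_size)]
--
--     # Define the 4x4 "bow and arrow" shape
--     pattern = [
--         [0, 1, 0, 0],
--         [0, 0, 1, 0],
--         [0, 0, 1, 0],
--         [0, 1, 0, 0]
--     ]
--
--     pattern_height = len(pattern)
--     pattern_width = len(pattern[0])
--     min_gap = 8  # Minimum horizontal gap between patterns
--
--     # Fixed vertical offset (starting row index)
--     offset_y = 1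
--
--     # Iterate horizontally with gap
--     for offset_x in range(0, grid_size - pattern_width + 1, pattern_width + min_gap):
--         for i in range(pattern_height):
--             for j in range(pattern_width):
--                 if offset_y + i < grid_size and offset_x + j < grid_size:
--                     grid[offset_y + i][offset_x + j] = pattern[i][j]
--
--     return grid
-- ===== SOURCE B (Python) =====
-- def initialize_glider_grid(grid_size):
--     # Closed form per cell: a cell (r, c) is live iff the fixed stamp has its
--     # live cell of row r at column offset c % 12 and the stamp anchored at
--     # column c - c % 12 fits inside the grid (anchor <= grid_size - 4).
--     # A row's content depends only on live_col.get(r), so each distinct row is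
--     # computed once (pure memoization) and copied.
--     live_col = {1: 1, 2: 2, 3: 2, 4: 1}  # grid row -> live column offset within a stamp
--     cache = {}
--
--     def row(j):
--         if j not in cache:
--             cache[j] = [1 if j == c % 12 and c - c % 12 <= grid_size - 4 else 0
--                         for c in range(grid_size)]
--         return list(cache[j])
--
--     return [row(live_col.get(r)) for r in range(grid_size)]
-- ===== Notes on version B (the rewrite author's own statement) =====
-- stated objective: alternative
-- what changed: Replaces A's mutate-and-stamp triple loop (allocate a zero grid, then overwrite dense 4x4 blocks at each stride-12 offset) with a closed-form per-cell formula: each cell is computed directly from its column's residue c % 12 and an anchor bound, building the grid in one pure comprehension with no mutation.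
import Mathlib
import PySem

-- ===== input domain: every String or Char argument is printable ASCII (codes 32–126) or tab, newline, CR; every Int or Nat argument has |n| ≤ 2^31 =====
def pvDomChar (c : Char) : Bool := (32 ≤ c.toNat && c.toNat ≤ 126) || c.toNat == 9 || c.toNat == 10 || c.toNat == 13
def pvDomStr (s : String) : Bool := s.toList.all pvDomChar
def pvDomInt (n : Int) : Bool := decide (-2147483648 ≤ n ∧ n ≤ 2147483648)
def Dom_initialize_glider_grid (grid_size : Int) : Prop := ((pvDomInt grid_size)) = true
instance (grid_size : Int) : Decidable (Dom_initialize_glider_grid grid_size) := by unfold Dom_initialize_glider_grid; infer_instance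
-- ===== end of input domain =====

-- B replaces A's mutate-and-stamp triple loop by a closed-form per-cell formula
-- (cell value from c % 12 and an anchor bound); alternative decomposition, not faster.

-- ===== PORT A =====
-- Python 'grid[r][c] = v': in A every written index is nonnegative (row = 1+i ≥ 1,
-- col = offset_x+j ≥ 0) and guarded < grid_size, so '.toNat' + 'List.set' is exact here.
def pySetCell (g : List (List Int)) (r c : Int) (v : Int) : List (List Int) :=
  g.set r.toNat ((g.getD r.toNat []).set c.toNat v)

def initialize_glider_grid (grid_size : Int) : List (List Int) :=
  let grid : List (List Int) :=
    (PySem.List.pyRange 0 grid_size).map (fun _ =>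
      (PySem.List.pyRange 0 grid_size).map (fun _ => (0 : Int)))
  let pattern : List (List Int) := [[0,1,0,0],[0,0,1,0],[0,0,1,0],[0,1,0,0]]
  let pattern_height : Int := (pattern.length : Int)
  let pattern_width : Int := ((PySem.List.pyGetD pattern 0 []).length : Int)  -- pattern[0]: index 0 is in range
  let min_gap : Int := 8
  let offset_y : Int := 1
  (PySem.List.pyRange 0 (grid_size - pattern_width + 1) (pattern_width + min_gap)).foldl
    (fun grid offset_x =>
      (PySem.List.pyRange 0 pattern_height).foldl (fun grid i =>
        (PySem.List.pyRange 0 pattern_width).foldl (fun grid j =>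
          if offset_y + i < grid_size ∧ offset_x + j < grid_size then
            pySetCell grid (offset_y + i) (offset_x + j)
              (PySem.List.pyGetD (PySem.List.pyGetD pattern i []) j 0)
          else grid) grid) grid) grid

-- ===== PORT B =====
-- Source B's 'cache' is pure memoization of the pure function 'row' (and 'list(...)' a
-- copy of its value): the port is 'row' itself, applied per grid row.
def initialize_glider_grid_alt (grid_size : Int) : List (List Int) :=
  let row : Option Int → List Int := fun j =>
    (PySem.List.pyRange 0 grid_size).map (fun c =>
      if j == some (PySem.Int.mod c 12) ∧
         c - PySem.Int.mod c 12 ≤ grid_size - 4 then (1 : Int) else 0)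
  let live_col : PySem.Dict Int Int := PySem.Dict.mk [(1,1),(2,2),(3,2),(4,1)]
  (PySem.List.pyRange 0 grid_size).map (fun r => row (live_col.get? r))

-- ===== PRECONDITION & SPEC =====
def Spec_initialize_glider_grid (grid_size : Int) (out : List (List Int)) : Prop := out = initialize_glider_grid_alt grid_size
instance (grid_size : Int) (out : List (List Int)) : Decidable (Spec_initialize_glider_grid grid_size out) := by unfold Spec_initialize_glider_grid; infer_instance

-- ===== CLAIM (what is proved, stated in full; the proofs are below) =====
def Claim_equal_initialize_glider_grid : Prop := ∀ (grid_size : Int), Dom_initialize_glider_grid grid_size → Spec_initialize_glider_grid grid_size (initialize_glider_grid grid_size)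

-- ===== LEMMAS AND PROOFS =====

-- cell read used by the pointwise arguments
def gval (g : List (List Int)) (r c : Nat) : Int := (g.getD r []).getD c 0

-- m×m shape
def shape (g : List (List Int)) (m : Nat) : Prop :=
  g.length = m ∧ ∀ row ∈ g, row.length = m

def patv (i j : Int) : Int :=
  PySem.List.pyGetD (PySem.List.pyGetD ([[0,1,0,0],[0,0,1,0],[0,0,1,0],[0,1,0,0]] : List (List Int)) i []) j 0

-- one conditional write of A
def upd (n : Int) (g : List (List Int)) (w : Int × Int × Int) : List (List Int) :=
  if 1 + w.2.1 < n ∧ w.1 + w.2.2 < n then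
    pySetCell g (1 + w.2.1) (w.1 + w.2.2) (patv w.2.1 w.2.2)
  else g

def writes (n : Int) : List (Int × Int × Int) :=
  (PySem.List.pyRange 0 (n - 4 + 1) 12).flatMap (fun ox =>
    (PySem.List.pyRange 0 4).flatMap (fun i =>
      (PySem.List.pyRange 0 4).map (fun j => (ox, i, j))))

def grid0 (n : Int) : List (List Int) :=
  (PySem.List.pyRange 0 n).map (fun _ => (PySem.List.pyRange 0 n).map (fun _ => (0 : Int)))

lemma A_eq_writes (n : Int) :
    initialize_glider_grid n = (writes n).foldl (upd n) (grid0 n) := by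
  simp only [initialize_glider_grid, writes, grid0, upd, patv, List.foldl_flatMap,
    List.foldl_map]
  rfl

lemma shape_pySetCell {g : List (List Int)} {m : Nat} (hs : shape g m) (r c : Int) (v : Int) :
    shape (pySetCell g r c v) m := by
  obtain ⟨h1, h2⟩ := hs
  by_cases ha : r.toNat < g.length
  · refine ⟨by simp [pySetCell, h1], ?_⟩
    intro row hrow
    rcases List.mem_or_eq_of_mem_set hrow with h | h
    · exact h2 row h
    · subst h
      rw [List.length_set, List.getD_eq_getElem g [] ha]
      exact h2 _ (List.getElem_mem ha)
  · rw [pySetCell, List.set_eq_of_length_le (by omega)]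
    exact ⟨h1, h2⟩

lemma gval_pySetCell {g : List (List Int)} {m : Nat} (hs : shape g m) {r c : Int}
    (hr : r.toNat < m) (hc : c.toNat < m) (v : Int) (r' c' : Nat) :
    gval (pySetCell g r c v) r' c' =
      if r' = r.toNat ∧ c' = c.toNat then v else gval g r' c' := by
  obtain ⟨h1, h2⟩ := hs
  have hrl : r.toNat < g.length := by omega
  have hrowlen : (g.getD r.toNat []).length = m := by
    rw [List.getD_eq_getElem g [] hrl]
    exact h2 _ (List.getElem_mem hrl)
  unfold gval pySetCell
  by_cases he : r' = r.toNat
  · subst he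
    have hl : r.toNat < (g.set r.toNat ((g.getD r.toNat []).set c.toNat v)).length := by
      rw [List.length_set]; exact hrl
    rw [List.getD_eq_getElem _ [] hl, List.getElem_set, if_pos rfl]
    by_cases hce : c' = c.toNat
    · subst hce
      have hcl : c.toNat < ((g.getD r.toNat []).set c.toNat v).length := by
        rw [List.length_set]; omega
      rw [List.getD_eq_getElem _ 0 hcl, List.getElem_set, if_pos rfl, if_pos ⟨rfl, rfl⟩]
    · rw [if_neg (by tauto)]
      by_cases hcl : c' < (g.getD r.toNat []).length
      · have hcl' : c' < ((g.getD r.toNat []).set c.toNat v).length := by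
          rw [List.length_set]; exact hcl
        rw [List.getD_eq_getElem _ 0 hcl', List.getElem_set, if_neg (by omega),
          List.getD_eq_getElem _ 0 hcl]
      · rw [List.getD_eq_default _ _ (by rw [List.length_set]; omega),
          List.getD_eq_default _ _ (by omega)]
  · rw [if_neg (by tauto)]
    by_cases hl : r' < g.length
    · have hl' : r' < (g.set r.toNat ((g.getD r.toNat []).set c.toNat v)).length := by
        rw [List.length_set]; exact hl
      rw [List.getD_eq_getElem _ [] hl', List.getElem_set, if_neg (by omega),
        List.getD_eq_getElem _ [] hl]
    · have e1 : (g.set r.toNat ((g.getD r.toNat []).set c.toNat v)).getD r' [] = [] :=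
        List.getD_eq_default _ _ (by rw [List.length_set]; omega)
      have e2 : g.getD r' [] = ([] : List Int) := List.getD_eq_default _ _ (by omega)
      rw [e1, e2]

lemma shape_upd {g : List (List Int)} {m : Nat} (hs : shape g m) (n : Int) (w : Int × Int × Int) :
    shape (upd n g w) m := by
  unfold upd
  split
  · exact shape_pySetCell hs _ _ _
  · exact hs

lemma shape_foldl_upd {m : Nat} (n : Int) (W : List (Int × Int × Int))
    (g : List (List Int)) (hs : shape g m) : shape (W.foldl (upd n) g) m := by
  induction W generalizing g with
  | nil => exact hs
  | cons w W ih => exact ih _ (shape_upd hs n w)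

lemma foldl_upd_gval (m : Nat) (W : List (Int × Int × Int)) (g : List (List Int))
    (hs : shape g m)
    (hW : ∀ w ∈ W, 0 ≤ w.1 ∧ 12 ∣ w.1 ∧ 0 ≤ w.2.1 ∧ w.2.1 < 4 ∧ 0 ≤ w.2.2 ∧ w.2.2 < 4)
    (r c : Nat) (hr : r < m) (hc : c < m) :
    gval (W.foldl (upd (m : Int)) g) r c =
      if ∃ w ∈ W, (r : Int) = 1 + w.2.1 ∧ (c : Int) = w.1 + w.2.2 then
        patv ((r : Int) - 1) ((c : Int) % 12)
      else gval g r c := by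
  induction W generalizing g with
  | nil => simp
  | cons w W ih =>
    obtain ⟨hw1, hw2, hw3, hw4, hw5, hw6⟩ := hW w (List.mem_cons_self)
    have hW' : ∀ w' ∈ W, 0 ≤ w'.1 ∧ 12 ∣ w'.1 ∧ 0 ≤ w'.2.1 ∧ w'.2.1 < 4 ∧ 0 ≤ w'.2.2 ∧ w'.2.2 < 4 :=
      fun w' h => hW w' (List.mem_cons_of_mem _ h)
    rw [List.foldl_cons, ih _ (shape_upd hs _ _) hW']
    have hrc : (r : Int) < (m : Int) := by exact_mod_cast hr
    have hcc : (c : Int) < (m : Int) := by exact_mod_cast hc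
    by_cases hhit : (r : Int) = 1 + w.2.1 ∧ (c : Int) = w.1 + w.2.2
    · obtain ⟨hh1, hh2⟩ := hhit
      have h1 : w.2.1 = (r : Int) - 1 := by omega
      have h2 : w.2.2 = (c : Int) % 12 := by omega
      have hupd : gval (upd (m : Int) g w) r c = patv ((r : Int) - 1) ((c : Int) % 12) := by
        unfold upd
        rw [if_pos (show 1 + w.2.1 < (m : Int) ∧ w.1 + w.2.2 < (m : Int) by omega),
          gval_pySetCell hs (by omega) (by omega) _ r c,
          if_pos (show r = (1 + w.2.1).toNat ∧ c = (w.1 + w.2.2).toNat by omega), h1, h2]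
      rw [hupd, ite_self, if_pos ⟨w, List.mem_cons_self, ⟨hh1, hh2⟩⟩]
    · have hnup : gval (upd (m : Int) g w) r c = gval g r c := by
        unfold upd
        split
        next hg =>
          rw [gval_pySetCell hs (by omega) (by omega) _ r c, if_neg]
          rintro ⟨e1, e2⟩
          exact hhit ⟨by omega, by omega⟩
        next hg => rfl
      rw [hnup]
      have hiff : (∃ w' ∈ w :: W, (r : Int) = 1 + w'.2.1 ∧ (c : Int) = w'.1 + w'.2.2) ↔
          (∃ w' ∈ W, (r : Int) = 1 + w'.2.1 ∧ (c : Int) = w'.1 + w'.2.2) := by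
        rw [List.exists_mem_cons_iff]
        tauto
      rw [if_congr hiff rfl rfl]

lemma shape_grid0 (m : Nat) : shape (grid0 (m : Int)) m := by
  unfold grid0 shape
  rw [PySem.List.pyRange_zero_natCast]
  refine ⟨by simp, ?_⟩
  intro row hrow
  simp only [List.mem_map] at hrow
  obtain ⟨x, _, hx⟩ := hrow
  simp [← hx]

lemma gval_grid0 (m : Nat) (r c : Nat) : gval (grid0 (m : Int)) r c = 0 := by
  unfold gval
  rcases Nat.lt_or_ge r (grid0 (m : Int)).length with h | h
  · rw [List.getD_eq_getElem _ _ h]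
    have hrow : (grid0 (m : Int))[r] = (PySem.List.pyRange 0 (m : Int)).map (fun _ => (0 : Int)) := by
      simp [grid0]
    rw [hrow]
    rcases Nat.lt_or_ge c ((PySem.List.pyRange 0 (m : Int)).map (fun _ => (0 : Int))).length with h2 | h2
    · rw [List.getD_eq_getElem _ _ h2]; simp
    · exact List.getD_eq_default _ _ h2
  · rw [List.getD_eq_default _ _ h]; simp

lemma hit_iff (m : Nat) (r c : Nat) :
    (∃ w ∈ writes (m : Int), (r : Int) = 1 + w.2.1 ∧ (c : Int) = w.1 + w.2.2) ↔
      (1 ≤ (r : Int) ∧ (r : Int) ≤ 4 ∧ (c : Int) % 12 < 4 ∧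
        (c : Int) - (c : Int) % 12 ≤ (m : Int) - 4) := by
  unfold writes
  constructor
  · rintro ⟨w, hw, h1, h2⟩
    simp only [List.mem_flatMap, List.mem_map] at hw
    obtain ⟨ox, hox, i, hi, j, hj, rfl⟩ := hw
    rw [PySem.List.mem_pyRange_iff_of_pos (by norm_num)] at hox hi hj
    simp only at h1 h2
    refine ⟨by omega, by omega, by omega, by omega⟩
  · rintro ⟨ha, hb, hc', hd⟩
    have hc0 : (0 : Int) ≤ (c : Int) := Int.natCast_nonneg c
    refine ⟨((c : Int) - (c : Int) % 12, (r : Int) - 1, (c : Int) % 12), ?_,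
      by show (r : Int) = 1 + ((r : Int) - 1); omega,
      by show (c : Int) = ((c : Int) - (c : Int) % 12) + (c : Int) % 12; omega⟩
    simp only [List.mem_flatMap, List.mem_map]
    refine ⟨(c : Int) - (c : Int) % 12, ?_, (r : Int) - 1, ?_, (c : Int) % 12, ?_, rfl⟩
    · rw [PySem.List.mem_pyRange_iff_of_pos (by norm_num)]
      refine ⟨by omega, by omega, by omega⟩
    · rw [PySem.List.mem_pyRange_iff_of_pos (by norm_num)]
      refine ⟨by omega, by omega, by omega⟩
    · rw [PySem.List.mem_pyRange_iff_of_pos (by norm_num)]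
      refine ⟨by omega, by omega, by omega⟩

def bcell (n r c : Int) : Int :=
  if (PySem.Dict.mk [((1:Int),(1:Int)),(2,2),(3,2),(4,1)]).get? r == some (PySem.Int.mod c 12) ∧
     c - PySem.Int.mod c 12 ≤ n - 4 then 1 else 0

lemma shape_B (m : Nat) : shape (initialize_glider_grid_alt (m : Int)) m := by
  unfold initialize_glider_grid_alt shape
  rw [PySem.List.pyRange_zero_natCast]
  refine ⟨by simp, ?_⟩
  intro row hrow
  simp only [List.mem_map] at hrow
  obtain ⟨x, _, hx⟩ := hrow
  simp [← hx]

lemma B_rows (m : Nat) : initialize_glider_grid_alt (m : Int) =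
    (List.range m).map (fun r : Nat => (List.range m).map (fun c : Nat => bcell (m : Int) ((r : Nat) : Int) ((c : Nat) : Int))) := by
  unfold initialize_glider_grid_alt bcell
  simp only [PySem.List.pyRange_zero_natCast, List.map_map, Function.comp_def]

lemma gval_B (m : Nat) (r c : Nat) (hr : r < m) (hc : c < m) :
    gval (initialize_glider_grid_alt (m : Int)) r c = bcell (m : Int) (r : Int) (c : Int) := by
  rw [B_rows]
  unfold gval
  have h1 : ((List.range m).map (fun r : Nat => (List.range m).map
        (fun c : Nat => bcell (m : Int) ((r : Nat) : Int) ((c : Nat) : Int)))).getD r []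
      = (List.range m).map (fun c : Nat => bcell (m : Int) ((r : Nat) : Int) ((c : Nat) : Int)) := by
    rw [List.getD_eq_getElem _ _ (by simpa using hr)]
    simp
  rw [h1, List.getD_eq_getElem _ _ (by simpa using hc)]
  simp

lemma shape_A (m : Nat) : shape (initialize_glider_grid (m : Int)) m := by
  rw [A_eq_writes]
  exact shape_foldl_upd _ _ _ (shape_grid0 m)

lemma cell_closed (n r c : Int) :
    (if 1 ≤ r ∧ r ≤ 4 ∧ c % 12 < 4 ∧ c - c % 12 ≤ n - 4 then patv (r - 1) (c % 12) else 0)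
      = bcell n r c := by
  unfold bcell
  rw [PySem.Int.mod_eq_emod_of_pos (by norm_num)]
  have hk0 : 0 ≤ c % 12 := by omega
  have hk12 : c % 12 < 12 := by omega
  by_cases h1 : r = 1
  · subst h1
    interval_cases h : c % 12 <;>
      simp [patv, PySem.Dict.get?, PySem.List.pyGetD]
  · by_cases h2 : r = 2
    · subst h2
      interval_cases h : c % 12 <;>
        simp [patv, PySem.Dict.get?, PySem.List.pyGetD]
    · by_cases h3 : r = 3
      · subst h3
        interval_cases h : c % 12 <;>
          simp [patv, PySem.Dict.get?, PySem.List.pyGetD]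
      · by_cases h4 : r = 4
        · subst h4
          interval_cases h : c % 12 <;>
            simp [patv, PySem.Dict.get?, PySem.List.pyGetD]
        · have hb1 : ((1 : Int) == r) = false := beq_eq_false_iff_ne.mpr (by omega)
          have hb2 : ((2 : Int) == r) = false := beq_eq_false_iff_ne.mpr (by omega)
          have hb3 : ((3 : Int) == r) = false := beq_eq_false_iff_ne.mpr (by omega)
          have hb4 : ((4 : Int) == r) = false := beq_eq_false_iff_ne.mpr (by omega)
          rw [if_neg (by omega)]
          simp [PySem.Dict.get?, List.find?, hb1, hb2, hb3, hb4]

lemma gval_A (m : Nat) (r c : Nat) (hr : r < m) (hc : c < m) :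
    gval (initialize_glider_grid (m : Int)) r c = bcell (m : Int) (r : Int) (c : Int) := by
  rw [A_eq_writes]
  have hWf : ∀ w ∈ writes (m : Int), 0 ≤ w.1 ∧ 12 ∣ w.1 ∧ 0 ≤ w.2.1 ∧ w.2.1 < 4 ∧
      0 ≤ w.2.2 ∧ w.2.2 < 4 := by
    intro w hw
    simp only [writes, List.mem_flatMap, List.mem_map] at hw
    obtain ⟨ox, hox, i, hi, j, hj, rfl⟩ := hw
    rw [PySem.List.mem_pyRange_iff_of_pos (by norm_num)] at hox hi hj
    exact ⟨show (0 : Int) ≤ ox by omega, show (12 : Int) ∣ ox by omega,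
      show (0 : Int) ≤ i by omega, show i < 4 by omega,
      show (0 : Int) ≤ j by omega, show j < 4 by omega⟩
  rw [foldl_upd_gval m _ _ (shape_grid0 m) hWf r c hr hc, gval_grid0,
    if_congr (hit_iff m r c) rfl rfl]
  exact cell_closed _ _ _

lemma eq_of_shape_gval {g h : List (List Int)} {m : Nat}
    (hg : shape g m) (hh : shape h m)
    (hv : ∀ r c, r < m → c < m → gval g r c = gval h r c) : g = h := by
  obtain ⟨hg1, hg2⟩ := hg
  obtain ⟨hh1, hh2⟩ := hh
  refine List.ext_getElem (by omega) ?_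
  intro i h1 h2
  refine List.ext_getElem ?_ ?_
  · rw [hg2 _ (List.getElem_mem h1), hh2 _ (List.getElem_mem h2)]
  · intro j hj1 hj2
    have hjm : j < m := by rw [← hg2 _ (List.getElem_mem h1)]; exact hj1
    have := hv i j (by omega) hjm
    unfold gval at this
    rw [List.getD_eq_getElem _ _ h1, List.getD_eq_getElem _ _ hj1,
      List.getD_eq_getElem _ _ h2, List.getD_eq_getElem _ _ hj2] at this
    exact this

lemma main_pos (m : Nat) :
    initialize_glider_grid (m : Int) = initialize_glider_grid_alt (m : Int) := by
  refine eq_of_shape_gval (shape_A m) (shape_B m) ?_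
  intro r c hr hc
  rw [gval_A m r c hr hc, gval_B m r c hr hc]

lemma main_nonpos (n : Int) (hn : n ≤ 0) :
    initialize_glider_grid n = initialize_glider_grid_alt n := by
  have h1 : PySem.List.pyRange 0 n 1 = [] := by
    rw [PySem.List.pyRange_of_pos _ _ (by norm_num)]
    simp [show ¬(0 : Int) < n by omega]
  have h2 : PySem.List.pyRange 0 (n - 4 + 1) 12 = [] := by
    rw [PySem.List.pyRange_of_pos _ _ (by norm_num)]
    simp [show ¬(0 : Int) < n - 4 + 1 by omega]
  rw [A_eq_writes]
  simp [writes, grid0, initialize_glider_grid_alt, h1, h2]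

-- ===== VERDICT (by name: the statement is the Claim_ definition above) =====
theorem initialize_glider_grid_spec : Claim_equal_initialize_glider_grid := by
  intro n _
  unfold Spec_initialize_glider_grid
  by_cases h : n ≤ 0
  · exact main_nonpos n h
  · have : n = (n.toNat : Int) := (Int.toNat_of_nonneg (by omega)).symm
    rw [this]; exact main_pos n.toNat
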